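-- pv_equiv track=rewrite | github.com/dguo456/jiuzhang | BFS/BFS新题.py | minimumStep
-- ===== SOURCE A (Python) =====
-- from collections import defaultdict, deque
--
-- def minimumStep(colors):
--     if not colors or len(colors) == 0:
--         return 0
--
--     graph = defaultdict(list)
--     for index, color in enumerate(colors):
--         graph[color].append(index)
--
--     queue = deque([0])
--     visited = set()
--     visited.add(0)
--     steps = -1
--
--     while queue:
--         steps += 1
--
--         for _ in range(len(queue)):
--             index = queue.popleft()
--
--             if index == len(colors) - 1:
--                 return steps
--
--             for next_index in graph[colors[index]]:
--                 if next_index == index: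
--                     continue
--                 if next_index not in visited:
--                     queue.append(next_index)
--                     visited.add(next_index)
--
--             graph[colors[index]] = []
--
--             if index + 1 < len(colors) and index+1 not in visited:
--                 queue.append(index+1)
--                 visited.add(index+1)
--
--             if index - 1 >= 0 and index-1 not in visited:
--                 queue.append(index-1)
--                 visited.add(index-1)
--
--     return steps
-- ===== SOURCE B (Python) =====
-- def minimumStep(colors):
--     # Bellman-Ford style relaxation over a distance array (no queue, no visited
--     # set, no graph mutation): each round takes per-color minima, then a forward
--     # and a backward sweep for the +-1 moves, stopping at a fixpoint.
--     if not colors: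
--         return 0
--     n = len(colors)
--     dist = [0] + [n] * (n - 1)
--     for _ in range(n - 1):
--         best = {}
--         for i in range(n):
--             c = colors[i]
--             if c not in best or dist[i] < best[c]:
--                 best[c] = dist[i]
--         new = []
--         for i in range(n):
--             v = dist[i]
--             b = best[colors[i]] + 1
--             if b < v:
--                 v = b
--             if i > 0 and new[i - 1] + 1 < v:
--                 v = new[i - 1] + 1
--             new.append(v)
--         for i in range(n - 2, -1, -1):
--             if new[i + 1] + 1 < new[i]:
--                 new[i] = new[i + 1] + 1
--         if new == dist:
--             break
--         dist = new
--     return dist[n - 1]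
-- ===== Notes on version B (the rewrite author's own statement) =====
-- stated objective: alternative
-- what changed: Replaces the queue/visited/graph-clearing BFS by Bellman-Ford-style relaxation over a distance array: each round takes per-color minima and then a forward and a backward sweep for the index±1 moves, iterating to a fixpoint (at most n-1 rounds); no queue, no visited set, no graph mutation.
import Mathlib
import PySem

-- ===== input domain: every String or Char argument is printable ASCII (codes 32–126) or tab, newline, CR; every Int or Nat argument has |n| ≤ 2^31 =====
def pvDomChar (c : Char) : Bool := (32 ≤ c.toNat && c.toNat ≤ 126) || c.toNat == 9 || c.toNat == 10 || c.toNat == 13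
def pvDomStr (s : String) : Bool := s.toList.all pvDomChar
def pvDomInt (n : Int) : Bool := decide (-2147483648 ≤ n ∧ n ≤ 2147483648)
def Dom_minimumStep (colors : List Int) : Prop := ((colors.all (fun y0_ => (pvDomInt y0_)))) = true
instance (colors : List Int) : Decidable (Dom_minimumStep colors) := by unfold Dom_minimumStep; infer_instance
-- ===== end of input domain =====

-- B replaces A's BFS (queue, visited set, color-group clearing) by Bellman-Ford-style
-- relaxation over a distance array (per-color minima plus forward/backward sweeps,
-- iterated to a fixpoint): a different algorithm, no speed claim.

-- ===== PORT A =====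
-- graph = defaultdict(list); for index, color in enumerate(colors): graph[color].append(index)
def pvGraphA (colors : List Int) : PySem.Dict Int (List Int) :=
  (PySem.List.enumerate colors).foldl
    (fun g p => g.modify p.2 [] (fun l => l ++ [p.1])) PySem.Dict.empty

-- 'for next_index in graph[colors[index]]: …' body, accumulator = (queue, visited)
def pvPushA (x : Int) (acc : List Int × PySem.Set Int) (y : Int) : List Int × PySem.Set Int :=
  if y = x then acc
  else if y ∈ acc.2 then acc
  else (acc.1 ++ [y], PySem.Set.add acc.2 y)

-- the inner 'for _ in range(len(queue))' loop; 'none' = the 'return steps' was taken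
def pvInnerA (colors : List Int) :
    Nat → PySem.Dict Int (List Int) → List Int → PySem.Set Int →
    Option (PySem.Dict Int (List Int) × List Int × PySem.Set Int)
  | 0, g, q, v => some (g, q, v)
  | _ + 1, g, [], v => some (g, [], v)   -- unreachable: the counter never exceeds the queue length
  | k + 1, g, x :: q1, v =>
    if x = PySem.List.len colors - 1 then none
    else
      let c := PySem.List.pyGetD colors x 0
      let qv := (g.getD c []).foldl (pvPushA x) (q1, v)
      let g1 := g.insert c []
      let qv1 := if x + 1 < PySem.List.len colors ∧ x + 1 ∉ qv.2 then
          (qv.1 ++ [x + 1], PySem.Set.add qv.2 (x + 1)) else qv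
      let qv2 := if 0 ≤ x - 1 ∧ x - 1 ∉ qv1.2 then
          (qv1.1 ++ [x - 1], PySem.Set.add qv1.2 (x - 1)) else qv1
      pvInnerA colors k g1 qv2.1 qv2.2

-- 'while queue: steps += 1; …'; the fuel only bounds the body (the loop runs at most
-- len(colors) times — each level visits a new index); at fuel 0 the value is arbitrary.
def pvOuterA (colors : List Int) :
    Nat → PySem.Dict Int (List Int) → List Int → PySem.Set Int → Int → Int
  | _, _, [], _, steps => steps
  | 0, _, _ :: _, _, steps => steps + 1   -- unreachable fuel exhaustion
  | f + 1, g, x :: q1, v, steps =>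
    match pvInnerA colors (x :: q1).length g (x :: q1) v with
    | none => steps + 1
    | some (g1, q2, v1) => pvOuterA colors f g1 q2 v1 (steps + 1)

def minimumStep (colors : List Int) : Int :=
  if colors = [] ∨ PySem.List.len colors = 0 then 0
  else
    pvOuterA colors (colors.length + 1) (pvGraphA colors) [0]
      (PySem.Set.add PySem.Set.empty 0) (-1)

-- ===== PORT B =====
-- best = {}; for i in range(n): c = colors[i]; if c not in best or dist[i] < best[c]: best[c] = dist[i]
def pvBestB (colors dist : List Int) : PySem.Dict Int Int :=
  (List.range colors.length).foldl
    (fun b i =>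
      let c := colors.getD i 0
      if b.contains c = false ∨ dist.getD i 0 < b.getD c 0 then b.insert c (dist.getD i 0)
      else b)
    PySem.Dict.empty

-- forward sweep: for i in range(n): v = dist[i]; b = best[colors[i]]+1; if b < v: v = b;
--                if i > 0 and new[i-1]+1 < v: v = new[i-1]+1; new.append(v)
-- (prev carries new[i-1]; none at i = 0)
def pvFwdB (best : PySem.Dict Int Int) : Option Int → List Int → List Int → List Int
  | _, [], _ => []
  | _, _ :: _, [] => []
  | prev, c :: cs, x :: ds =>
    let v1 := if best.getD c 0 + 1 < x then best.getD c 0 + 1 else x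
    let v2 := match prev with
      | some p => if p + 1 < v1 then p + 1 else v1
      | none => v1
    v2 :: pvFwdB best (some v2) cs ds

-- backward sweep: for i in range(n-2, -1, -1): if new[i+1]+1 < new[i]: new[i] = new[i+1]+1
-- (right-to-left in-place update = structural recursion from the right)
def pvBwdB : List Int → List Int
  | [] => []
  | [x] => [x]
  | x :: y :: rest =>
    match pvBwdB (y :: rest) with
    | [] => [x]   -- unreachable: pvBwdB preserves nonemptiness
    | z :: r => (if z + 1 < x then z + 1 else x) :: z :: r

-- one relaxation round
def pvRoundB (colors dist : List Int) : List Int :=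
  pvBwdB (pvFwdB (pvBestB colors dist) none colors dist)

-- for _ in range(n-1): … ; if new == dist: break ; dist = new
def pvIterB (colors : List Int) : Nat → List Int → List Int
  | 0, dist => dist
  | f + 1, dist =>
    let nd := pvRoundB colors dist
    if nd = dist then dist else pvIterB colors f nd

def minimumStep_alt (colors : List Int) : Int :=
  if colors = [] then 0
  else
    (pvIterB colors (colors.length - 1)
      ((0 : Int) :: List.replicate (colors.length - 1) (PySem.List.len colors))).getD
      (colors.length - 1) 0

-- ===== PRECONDITION & SPEC =====
def Spec_minimumStep (colors : List Int) (out : Int) : Prop := out = minimumStep_alt colors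
instance (colors : List Int) (out : Int) : Decidable (Spec_minimumStep colors out) := by unfold Spec_minimumStep; infer_instance

-- ===== CLAIM (what is proved, stated in full; the proofs are below) =====
def Claim_equal_minimumStep : Prop := ∀ (colors : List Int), Dom_minimumStep colors → Spec_minimumStep colors (minimumStep colors)

-- ===== LEMMAS AND PROOFS =====

-- ---------- the reference semantics: graph distance from index 0 ----------

-- the edge relation of the Python problem: index ±1 or equal colors
def pvE (colors : List Int) (i j : Nat) : Prop :=
  i < colors.length ∧ j < colors.length ∧ i ≠ j ∧
    (j = i + 1 ∨ i = j + 1 ∨ colors.getD i 0 = colors.getD j 0)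

-- reachable from 0 in ≤ t steps
def pvReach (colors : List Int) : Nat → Nat → Prop
  | 0 => fun i => i = 0
  | t + 1 => fun i => pvReach colors t i ∨ ∃ j, pvReach colors t j ∧ pvE colors j i

-- distance from 0
noncomputable def pvD (colors : List Int) (i : Nat) : Nat :=
  sInf {t | pvReach colors t i}

theorem pvE_symm {colors : List Int} {i j : Nat} (h : pvE colors i j) : pvE colors j i := by
  obtain ⟨h1, h2, h3, h4⟩ := h
  exact ⟨h2, h1, fun e => h3 e.symm, by tauto⟩

theorem pvE_succ {colors : List Int} {i : Nat} (h : i + 1 < colors.length) :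
    pvE colors i (i + 1) :=
  ⟨by omega, h, by omega, Or.inl rfl⟩

theorem pvReach_self {colors : List Int} : ∀ i, i < colors.length → pvReach colors i i := by
  intro i
  induction i with
  | zero => intro _; rfl
  | succ i ih =>
    intro h
    exact Or.inr ⟨i, ih (by omega), pvE_succ h⟩

theorem pvD_reach {colors : List Int} {i : Nat} (h : i < colors.length) :
    pvReach colors (pvD colors i) i := by
  have : pvD colors i ∈ {t | pvReach colors t i} :=
    Nat.sInf_mem ⟨i, Set.mem_setOf_eq ▸ pvReach_self i h⟩
  exact this

theorem pvD_le {colors : List Int} {t i : Nat} (h : pvReach colors t i) : pvD colors i ≤ t :=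
  Nat.sInf_le (Set.mem_setOf_eq ▸ h)

theorem pvD_le_self {colors : List Int} {i : Nat} (h : i < colors.length) :
    pvD colors i ≤ i :=
  pvD_le (pvReach_self i h)

theorem pvD_zero {colors : List Int} : pvD colors 0 = 0 :=
  Nat.le_zero.mp (pvD_le rfl)

theorem pvD_eq_zero {colors : List Int} {i : Nat} (h : i < colors.length)
    (h0 : pvD colors i = 0) : i = 0 := by
  have := pvD_reach h
  rw [h0] at this
  exact this

theorem pvD_edge_le {colors : List Int} {i j : Nat} (h : pvE colors j i) :
    pvD colors i ≤ pvD colors j + 1 := by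
  exact pvD_le (Or.inr ⟨j, pvD_reach h.1, h⟩)

theorem pvD_pred {colors : List Int} {i t : Nat} (hi : i < colors.length)
    (h : pvD colors i = t + 1) : ∃ j, pvE colors j i ∧ pvD colors j ≤ t := by
  have hr := pvD_reach hi
  rw [h] at hr
  rcases hr with hr | ⟨j, hrj, he⟩
  · exact absurd (pvD_le hr) (by omega)
  · exact ⟨j, he, pvD_le hrj⟩

theorem pvD_level_nonempty {colors : List Int} :
    ∀ (k i : Nat), i < colors.length → ∀ u, pvD colors i = u + k →
      ∃ j, j < colors.length ∧ pvD colors j = u := by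
  intro k
  induction k with
  | zero => intro i hi u hu; exact ⟨i, hi, by omega⟩
  | succ k ih =>
    intro i hi u hu
    obtain ⟨j, he, hj⟩ := pvD_pred hi (t := u + k) (by omega)
    have h2 : pvD colors i ≤ pvD colors j + 1 := pvD_edge_le he
    have hj2 : pvD colors j = u + k := by omega
    exact ih j he.1 u hj2

-- ---------- A-side: the group dictionary ----------

theorem pvGraphA_getD (colors : List Int) (c : Int) :
    (pvGraphA colors).getD c [] =
      (((PySem.List.enumerate colors).map Prod.swap).filter (fun p => p.1 == c)).map (·.2) := by
  have h := PySem.Dict.getD_foldl_modify_append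
    (l := (PySem.List.enumerate colors).map Prod.swap) (d := PySem.Dict.empty) (c := c)
  rw [List.foldl_map] at h
  simpa [pvGraphA, Prod.swap] using h

theorem pvGraphA_mem (colors : List Int) (c z : Int) :
    z ∈ (pvGraphA colors).getD c [] ↔
      ∃ k, k < colors.length ∧ z = (k : Int) ∧ colors.getD k 0 = c := by
  rw [pvGraphA_getD]
  simp only [List.mem_map, List.mem_filter, PySem.List.mem_enumerate_iff]
  constructor
  · rintro ⟨p, ⟨⟨q, ⟨k, hk, rfl⟩, rfl⟩, hc⟩, rfl⟩
    refine ⟨k, hk, by simp, ?_⟩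
    have := beq_iff_eq.mp hc
    simp only [Prod.swap] at this ⊢
    rw [List.getD_eq_getElem _ _ hk]
    simpa using this
  · rintro ⟨k, hk, rfl, hc⟩
    refine ⟨(colors[k], (0 : Int) + k), ⟨⟨((0 : Int) + k, colors[k]), ⟨k, hk, rfl⟩, rfl⟩, ?_⟩, by simp⟩
    have : colors[k] = c := by rw [← hc, List.getD_eq_getElem _ _ hk]
    simp [this]


-- ---------- A-side: level-set reformulation of the BFS (proof device) ----------

def lvlPush (acc : PySem.Set Int × List Int) (y : Int) : PySem.Set Int × List Int :=
  if y ∈ acc.1 then acc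
  else (PySem.Set.add acc.1 y, acc.2 ++ [y])

def lvlExpand (colors : List Int) (n : Int) :
    List Int → PySem.Dict Int (List Int) → PySem.Set Int → List Int →
    PySem.Dict Int (List Int) × PySem.Set Int × List Int
  | [], g, v, nxt => (g, v, nxt)
  | x :: rest, g, v, nxt =>
    let c := PySem.List.pyGetD colors x 0
    let vn := (g.getD c []).foldl lvlPush (v, nxt)
    let g1 := g.insert c []
    let vn1 := if x + 1 < n ∧ x + 1 ∉ vn.1 then
        (PySem.Set.add vn.1 (x + 1), vn.2 ++ [x + 1]) else vn
    let vn2 := if 0 ≤ x - 1 ∧ x - 1 ∉ vn1.1 then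
        (PySem.Set.add vn1.1 (x - 1), vn1.2 ++ [x - 1]) else vn1
    lvlExpand colors n rest g1 vn2.1 vn2.2

def lvlOuter (colors : List Int) (n : Int) :
    Nat → PySem.Dict Int (List Int) → PySem.Set Int → List Int → Int → Int
  | fuel, g, v, frontier, steps =>
    if (n - 1) ∈ frontier then steps
    else
      match fuel with
      | 0 => steps
      | f + 1 =>
        let r := lvlExpand colors n frontier g v []
        if r.2.2 = [] then steps
        else lvlOuter colors n f r.1 r.2.1 r.2.2 (steps + 1)

-- v only grows along the group loop
theorem lvlPush_mono : ∀ (l : List Int) (v : PySem.Set Int) (nxt : List Int) (z : Int),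
    z ∈ v → z ∈ (l.foldl lvlPush (v, nxt)).1 := by
  intro l
  induction l with
  | nil => intro v nxt z hz; simpa using hz
  | cons y l ih =>
    intro v nxt z hz
    simp only [List.foldl_cons, lvlPush]
    split_ifs with h
    · exact ih v nxt z hz
    · exact ih _ _ z (by simp [PySem.Set.mem_add, hz])

-- everything the group loop puts into nxt is also in v
theorem lvlPush_sub : ∀ (l : List Int) (v : PySem.Set Int) (nxt : List Int),
    (∀ z ∈ nxt, z ∈ v) →
    ∀ z ∈ (l.foldl lvlPush (v, nxt)).2, z ∈ (l.foldl lvlPush (v, nxt)).1 := by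
  intro l
  induction l with
  | nil => intro v nxt h z hz; simpa using h z (by simpa using hz)
  | cons y l ih =>
    intro v nxt h
    simp only [List.foldl_cons, lvlPush]
    split_ifs with hy
    · exact ih v nxt h
    · refine ih _ _ ?_
      intro z hz
      rcases List.mem_append.1 hz with hz | hz
      · simp [PySem.Set.mem_add, h z hz]
      · simp [PySem.Set.mem_add, List.mem_singleton.1 hz]

-- the conditional ±1 push keeps nxt inside visited
theorem lvlIfPush_sub (p : PySem.Set Int × List Int) (w : Int) (c : Prop) [Decidable c]
    (h : ∀ z ∈ p.2, z ∈ p.1) :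
    ∀ z ∈ (if c then (PySem.Set.add p.1 w, p.2 ++ [w]) else p).2,
      z ∈ (if c then (PySem.Set.add p.1 w, p.2 ++ [w]) else p).1 := by
  split_ifs
  · intro z hz
    rcases List.mem_append.1 hz with hz | hz
    · simp [PySem.Set.mem_add, h z hz]
    · simp [PySem.Set.mem_add, List.mem_singleton.1 hz]
  · exact h

-- the frontier produced by a level expansion is contained in the produced visited set
theorem lvlExpand_sub : ∀ (colors : List Int) (n : Int) (rest : List Int)
    (g : PySem.Dict Int (List Int)) (v : PySem.Set Int) (nxt : List Int),
    (∀ z ∈ nxt, z ∈ v) →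
    ∀ z ∈ (lvlExpand colors n rest g v nxt).2.2, z ∈ (lvlExpand colors n rest g v nxt).2.1 := by
  intro colors n rest
  induction rest with
  | nil => intro g v nxt h z hz; simpa using h z (by simpa [lvlExpand] using hz)
  | cons x rest ih =>
    intro g v nxt h
    simp only [lvlExpand]
    apply ih
    exact lvlIfPush_sub _ _ _ (lvlIfPush_sub _ _ _
      (lvlPush_sub (g.getD (PySem.List.pyGetD colors x 0) []) v nxt h))

-- the group loops of A and the level form run in lockstep
theorem pvPush_corr : ∀ (l : List Int) (x : Int) (rest nxt : List Int) (v : PySem.Set Int),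
    x ∈ v →
    l.foldl (pvPushA x) (rest ++ nxt, v)
      = (rest ++ (l.foldl lvlPush (v, nxt)).2, (l.foldl lvlPush (v, nxt)).1) := by
  intro l
  induction l with
  | nil => intro x rest nxt v _; simp
  | cons y l ih =>
    intro x rest nxt v hx
    simp only [List.foldl_cons, pvPushA, lvlPush]
    by_cases hyx : y = x
    · subst hyx
      simp only [if_pos hx]
      exact ih y rest nxt v hx
    · by_cases hyv : y ∈ v
      · simp only [if_neg hyx, if_pos hyv]
        exact ih x rest nxt v hx
      · simp only [if_neg hyx, if_neg hyv, List.append_assoc]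
        exact ih x rest (nxt ++ [y]) _ (by simp [PySem.Set.mem_add, hx])

-- A's inner loop, started on a level none of whose nodes is the target, is one level expansion
theorem pvInner_corr (colors : List Int) (rest : List Int) :
    ∀ (g : PySem.Dict Int (List Int)) (v : PySem.Set Int) (nxt : List Int),
    (∀ z ∈ rest, z ∈ v) → (PySem.List.len colors - 1) ∉ rest →
    pvInnerA colors rest.length g (rest ++ nxt) v =
      some ((lvlExpand colors (PySem.List.len colors) rest g v nxt).1,
            (lvlExpand colors (PySem.List.len colors) rest g v nxt).2.2,
            (lvlExpand colors (PySem.List.len colors) rest g v nxt).2.1) := by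
  induction rest with
  | nil => intro g v nxt _ _; simp [pvInnerA, lvlExpand]
  | cons x rest ih =>
    intro g v nxt hsub hne
    have hx : ¬ x = PySem.List.len colors - 1 := by
      intro h; exact hne (by simp [h])
    have hxv : x ∈ v := hsub x (by simp)
    have hne' : (PySem.List.len colors - 1) ∉ rest := by
      intro h; exact hne (List.mem_cons_of_mem _ h)
    simp only [List.cons_append, List.length_cons, pvInnerA, if_neg hx]
    rw [pvPush_corr _ x rest nxt v hxv]
    simp only [lvlExpand]
    split_ifs <;>
    · simp only [List.append_assoc]
      refine ih _ _ _ (fun z hz => ?_) hne'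
      have hzb := lvlPush_mono (g.getD (PySem.List.pyGetD colors x 0) []) v nxt z
        (hsub z (List.mem_cons_of_mem _ hz))
      simp [PySem.Set.mem_add, hzb]

-- if the target sits in the level, A's inner loop takes the early return
theorem pvInner_found (colors : List Int) (rest : List Int) :
    ∀ (g : PySem.Dict Int (List Int)) (v : PySem.Set Int) (nxt : List Int),
    (∀ z ∈ rest, z ∈ v) → (PySem.List.len colors - 1) ∈ rest →
    pvInnerA colors rest.length g (rest ++ nxt) v = none := by
  induction rest with
  | nil => intro g v nxt _ h; simp at h
  | cons x rest ih =>
    intro g v nxt hsub hmem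
    by_cases hx : x = PySem.List.len colors - 1
    · simp [pvInnerA, hx]
    · have hmem' : (PySem.List.len colors - 1) ∈ rest := by
        rcases List.mem_cons.1 hmem with h | h
        · exact absurd h.symm hx
        · exact h
      have hxv : x ∈ v := hsub x (by simp)
      simp only [List.cons_append, List.length_cons, pvInnerA, if_neg hx]
      rw [pvPush_corr _ x rest nxt v hxv]
      split_ifs <;>
      · simp only [List.append_assoc]
        refine ih _ _ _ (fun z hz => ?_) hmem'
        have hzb := lvlPush_mono (g.getD (PySem.List.pyGetD colors x 0) []) v nxt z
          (hsub z (List.mem_cons_of_mem _ hz))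
        simp [PySem.Set.mem_add, hzb]

-- the two outer loops in lockstep
theorem pvOuter_corr (colors : List Int) : ∀ (fuel : Nat) (g : PySem.Dict Int (List Int))
    (v : PySem.Set Int) (frontier : List Int) (steps : Int),
    frontier ≠ [] →
    (∀ z ∈ frontier, z ∈ v) →
    pvOuterA colors fuel g frontier v steps =
      lvlOuter colors (PySem.List.len colors) fuel g v frontier (steps + 1) := by
  intro fuel
  induction fuel with
  | zero =>
    intro g v frontier steps hfr _
    obtain ⟨x, q1, rfl⟩ : ∃ x q1, frontier = x :: q1 := by
      cases frontier with
      | nil => exact absurd rfl hfr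
      | cons x q1 => exact ⟨x, q1, rfl⟩
    simp only [pvOuterA, lvlOuter]
    split_ifs <;> rfl
  | succ f ih =>
    intro g v frontier steps hfr hsub
    obtain ⟨x, q1, rfl⟩ : ∃ x q1, frontier = x :: q1 := by
      cases frontier with
      | nil => exact absurd rfl hfr
      | cons x q1 => exact ⟨x, q1, rfl⟩
    by_cases hmem : (PySem.List.len colors - 1) ∈ x :: q1
    · have hin := pvInner_found colors (x :: q1) g v [] hsub hmem
      rw [List.append_nil] at hin
      simp only [List.length_cons] at hin
      simp only [pvOuterA, lvlOuter, List.length_cons, hin, if_pos hmem]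
    · have hin := pvInner_corr colors (x :: q1) g v [] hsub hmem
      rw [List.append_nil] at hin
      simp only [List.length_cons] at hin
      simp only [pvOuterA, lvlOuter, List.length_cons, hin, if_neg hmem]
      split_ifs with hemp
      · rw [hemp]
        simp [pvOuterA]
      · exact ih _ _ _ (steps + 1) hemp
          (lvlExpand_sub colors _ (x :: q1) g v [] (by intro z hz; simp at hz))

-- ---------- A-side: BFS invariants ----------

-- membership in the two components of the group-push fold
theorem lvlPush_fst_iff : ∀ (l : List Int) (v : PySem.Set Int) (nxt : List Int) (z : Int),
    z ∈ (l.foldl lvlPush (v, nxt)).1 ↔ z ∈ v ∨ z ∈ l := by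
  intro l
  induction l with
  | nil => intro v nxt z; simp
  | cons y l ih =>
    intro v nxt z
    simp only [List.foldl_cons, lvlPush]
    split_ifs with h
    · rw [ih]
      constructor
      · rintro (hz | hz)
        · exact Or.inl hz
        · exact Or.inr (List.mem_cons_of_mem _ hz)
      · rintro (hz | hz)
        · exact Or.inl hz
        · rcases List.mem_cons.1 hz with rfl | hz
          · exact Or.inl h
          · exact Or.inr hz
    · rw [ih]
      simp only [PySem.Set.mem_add, List.mem_cons]
      tauto
  
theorem lvlPush_snd_iff : ∀ (l : List Int) (v : PySem.Set Int) (nxt : List Int) (z : Int),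
    z ∈ (l.foldl lvlPush (v, nxt)).2 ↔ z ∈ nxt ∨ (z ∈ l ∧ z ∉ v) := by
  intro l
  induction l with
  | nil => intro v nxt z; simp
  | cons y l ih =>
    intro v nxt z
    simp only [List.foldl_cons, lvlPush]
    split_ifs with h
    · rw [ih]
      simp only [List.mem_cons]
      constructor
      · rintro (hz | ⟨hz, hv⟩)
        · exact Or.inl hz
        · exact Or.inr ⟨Or.inr hz, hv⟩
      · rintro (hz | ⟨hz | hz, hv⟩)
        · exact Or.inl hz
        · exact absurd (hz ▸ h) hv
        · exact Or.inr ⟨hz, hv⟩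
    · rw [ih]
      simp only [List.mem_append, List.mem_singleton, PySem.Set.mem_add, List.mem_cons]
      by_cases hzy : z = y <;> simp [hzy] <;> tauto

-- the mid-level invariant of A's BFS, at distance level t, with remaining level list R
def pvMInv (colors : List Int) (t : Nat) (R : List Int) (g : PySem.Dict Int (List Int))
    (v : PySem.Set Int) (nxt : List Int) : Prop :=
  (∀ z ∈ R, ∃ i, i < colors.length ∧ z = (i : Int) ∧ pvD colors i = t) ∧
  (∀ z ∈ nxt, ∃ i, i < colors.length ∧ z = (i : Int) ∧ pvD colors i = t + 1) ∧
  (∀ z, z ∈ v → ((∃ i, i < colors.length ∧ z = (i : Int) ∧ pvD colors i ≤ t) ∨ z ∈ nxt)) ∧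
  (∀ i, i < colors.length → pvD colors i ≤ t → (i : Int) ∈ v) ∧
  (∀ z ∈ nxt, z ∈ v) ∧
  (∀ c, g.getD c [] = (pvGraphA colors).getD c [] ∨
    (g.getD c [] = [] ∧ ∀ i, i < colors.length → colors.getD i 0 = c → (i : Int) ∈ v)) ∧
  (∀ i, i < colors.length → pvD colors i = t + 1 →
    ((i : Int) ∈ v ∨ ∃ z ∈ R, ∃ a, a < colors.length ∧ z = (a : Int) ∧ pvE colors a i))

-- the top-of-level invariant
def pvTInv (colors : List Int) (t : Nat) (g : PySem.Dict Int (List Int))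
    (v : PySem.Set Int) (F : List Int) : Prop :=
  (∀ z ∈ F, ∃ i, i < colors.length ∧ z = (i : Int) ∧ pvD colors i = t) ∧
  (∀ i, i < colors.length → pvD colors i = t → (i : Int) ∈ F) ∧
  (∀ z, z ∈ v ↔ ∃ i, i < colors.length ∧ z = (i : Int) ∧ pvD colors i ≤ t) ∧
  (∀ c, g.getD c [] = (pvGraphA colors).getD c [] ∨
    (g.getD c [] = [] ∧ ∀ i, i < colors.length → colors.getD i 0 = c → (i : Int) ∈ v))

theorem pvTInv_to_MInv {colors : List Int} {t : Nat} {g : PySem.Dict Int (List Int)}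
    {v : PySem.Set Int} {F : List Int} (h : pvTInv colors t g v F) :
    pvMInv colors t F g v [] := by
  obtain ⟨t1, t2, t3, t4⟩ := h
  refine ⟨t1, by simp, ?_, ?_, by simp, t4, ?_⟩
  · intro z hz
    exact Or.inl ((t3 z).1 hz)
  · intro i hi hd
    exact (t3 _).2 ⟨i, hi, rfl, hd⟩
  · intro i hi hd
    obtain ⟨j, he, hj⟩ := pvD_pred hi hd
    have hij : pvD colors i ≤ pvD colors j + 1 := pvD_edge_le he
    have hjt : pvD colors j = t := by omega
    exact Or.inr ⟨(j : Int), t2 j he.1 hjt, j, he.1, rfl, he⟩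

theorem pvMInv_to_TInv {colors : List Int} {t : Nat} {g : PySem.Dict Int (List Int)}
    {v : PySem.Set Int} {nxt : List Int} (h : pvMInv colors t [] g v nxt) :
    pvTInv colors (t + 1) g v nxt := by
  obtain ⟨m1, m2, m3, m4, m5, m6, m7⟩ := h
  have hnxt : ∀ i, i < colors.length → pvD colors i = t + 1 → (i : Int) ∈ nxt := by
    intro i hi hd
    have hv : (i : Int) ∈ v := by
      rcases m7 i hi hd with hv | ⟨z, hz, _⟩
      · exact hv
      · simp at hz
    rcases m3 _ hv with ⟨i', hi', he, hd'⟩ | hn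
    · have heq : i' = i := by exact_mod_cast he.symm
      subst heq
      omega
    · exact hn
  refine ⟨m2, hnxt, ?_, ?_⟩
  · intro z
    constructor
    · intro hv
      rcases m3 z hv with ⟨i, hi, rfl, hd⟩ | hn
      · exact ⟨i, hi, rfl, by omega⟩
      · obtain ⟨i, hi, rfl, hd⟩ := m2 z hn
        exact ⟨i, hi, rfl, by omega⟩
    · rintro ⟨i, hi, rfl, hd⟩
      rcases Nat.lt_or_ge (pvD colors i) (t + 1) with hlt | hge
      · exact m4 i hi (by omega)
      · exact m5 _ (hnxt i hi (by omega))
  · intro c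
    rcases m6 c with h | ⟨he, hall⟩
    · exact Or.inl h
    · exact Or.inr ⟨he, hall⟩

-- one iteration of the level expansion preserves the mid-level invariant
theorem pvMInv_step {colors : List Int} {t : Nat} {x : Int} {rest : List Int}
    {g : PySem.Dict Int (List Int)} {v : PySem.Set Int} {nxt : List Int}
    (h : pvMInv colors t (x :: rest) g v nxt) :
    pvMInv colors t rest
      (g.insert (PySem.List.pyGetD colors x 0) [])
      (let c := PySem.List.pyGetD colors x 0
       let vn := (g.getD c []).foldl lvlPush (v, nxt)
       let vn1 := if x + 1 < PySem.List.len colors ∧ x + 1 ∉ vn.1 then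
           (PySem.Set.add vn.1 (x + 1), vn.2 ++ [x + 1]) else vn
       let vn2 := if 0 ≤ x - 1 ∧ x - 1 ∉ vn1.1 then
           (PySem.Set.add vn1.1 (x - 1), vn1.2 ++ [x - 1]) else vn1
       vn2).1
      (let c := PySem.List.pyGetD colors x 0
       let vn := (g.getD c []).foldl lvlPush (v, nxt)
       let vn1 := if x + 1 < PySem.List.len colors ∧ x + 1 ∉ vn.1 then
           (PySem.Set.add vn.1 (x + 1), vn.2 ++ [x + 1]) else vn
       let vn2 := if 0 ≤ x - 1 ∧ x - 1 ∉ vn1.1 then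
           (PySem.Set.add vn1.1 (x - 1), vn1.2 ++ [x - 1]) else vn1
       vn2).2 := by
  obtain ⟨m1, m2, m3, m4, m5, m6, m7⟩ := h
  obtain ⟨a, ha, rfl, hda⟩ := m1 _ (List.mem_cons_self)
  have hav : (a : Int) ∈ v := m4 a ha (le_of_eq hda)
  have hc : PySem.List.pyGetD colors (a : Int) 0 = colors.getD a 0 := by
    simp [PySem.List.pyGetD_natCast]
  set c := PySem.List.pyGetD colors (a : Int) 0 with hcdef
  set l := g.getD c [] with hldef
  -- the group list: every member is an index of color c
  have hlmem : ∀ z ∈ l, ∃ k, k < colors.length ∧ z = (k : Int) ∧ colors.getD k 0 = c := by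
    intro z hz
    rcases m6 c with h6 | ⟨h6, _⟩
    · rw [hldef, h6] at hz
      exact (pvGraphA_mem colors c z).1 hz
    · rw [hldef, h6] at hz
      simp at hz
  set vn := l.foldl lvlPush (v, nxt) with hvndef
  have hvn1mem : ∀ z, z ∈ vn.1 ↔ z ∈ v ∨ z ∈ l := fun z => lvlPush_fst_iff l v nxt z
  have hvn2mem : ∀ z, z ∈ vn.2 ↔ z ∈ nxt ∨ (z ∈ l ∧ z ∉ v) := fun z => lvlPush_snd_iff l v nxt z
  -- distances of freshly pushed nodes
  have hfresh : ∀ k, k < colors.length → pvE colors a k → (k : Int) ∉ v →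
      pvD colors k = t + 1 := by
    intro k hk he hkv
    have h1 : pvD colors k ≤ t + 1 := by
      have := pvD_edge_le he
      omega
    have h2 : ¬ pvD colors k ≤ t := fun hle => hkv (m4 k hk hle)
    omega
  set vn1 := if (a : Int) + 1 < PySem.List.len colors ∧ (a : Int) + 1 ∉ vn.1 then
      (PySem.Set.add vn.1 ((a : Int) + 1), vn.2 ++ [(a : Int) + 1]) else vn with hvn1def
  set vn2 := if 0 ≤ (a : Int) - 1 ∧ (a : Int) - 1 ∉ vn1.1 then
      (PySem.Set.add vn1.1 ((a : Int) - 1), vn1.2 ++ [(a : Int) - 1]) else vn1 with hvn2def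
  have hv1mem : ∀ z, z ∈ vn1.1 ↔ z ∈ vn.1 ∨
      (((a : Int) + 1 < PySem.List.len colors ∧ (a : Int) + 1 ∉ vn.1) ∧ z = (a : Int) + 1) := by
    intro z
    rw [hvn1def]
    split_ifs with hg
    · simp only [PySem.Set.mem_add]
      tauto
    · tauto
  have hv1mem2 : ∀ z, z ∈ vn1.2 ↔ z ∈ vn.2 ∨
      (((a : Int) + 1 < PySem.List.len colors ∧ (a : Int) + 1 ∉ vn.1) ∧ z = (a : Int) + 1) := by
    intro z
    rw [hvn1def]
    split_ifs with hg
    · simp only [List.mem_append, List.mem_singleton]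
      tauto
    · tauto
  have hv2mem : ∀ z, z ∈ vn2.1 ↔ z ∈ vn1.1 ∨
      ((0 ≤ (a : Int) - 1 ∧ (a : Int) - 1 ∉ vn1.1) ∧ z = (a : Int) - 1) := by
    intro z
    rw [hvn2def]
    split_ifs with hg
    · simp only [PySem.Set.mem_add]
      tauto
    · tauto
  have hv2mem2 : ∀ z, z ∈ vn2.2 ↔ z ∈ vn1.2 ∨
      ((0 ≤ (a : Int) - 1 ∧ (a : Int) - 1 ∉ vn1.1) ∧ z = (a : Int) - 1) := by
    intro z
    rw [hvn2def]
    split_ifs with hg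
    · simp only [List.mem_append, List.mem_singleton]
      tauto
    · tauto
  have hmono : ∀ z, z ∈ v → z ∈ vn2.1 := by
    intro z hz
    rw [hv2mem, hv1mem, hvn1mem]
    exact Or.inl (Or.inl (Or.inl hz))
  have hnl : (colors.length : Int) = PySem.List.len colors := by
    simp [PySem.List.len_eq]
  -- soundness of every element of the produced next level
  have hsound : ∀ z ∈ vn2.2, z ∈ nxt ∨
      ∃ i, i < colors.length ∧ z = (i : Int) ∧ pvD colors i = t + 1 ∧ (i : Int) ∉ v := by
    intro z hz
    rcases (hv2mem2 z).1 hz with hz1 | ⟨⟨hg1, hg2⟩, rfl⟩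
    · rcases (hv1mem2 z).1 hz1 with hz2 | ⟨⟨hg1, hg2⟩, rfl⟩
      · rcases (hvn2mem z).1 hz2 with hz3 | ⟨hzl, hzv⟩
        · exact Or.inl hz3
        · obtain ⟨k, hk, rfl, hck⟩ := hlmem _ hzl
          have hne : a ≠ k := by
            rintro rfl
            exact hzv hav
          have he : pvE colors a k := ⟨ha, hk, hne, Or.inr (Or.inr (hc.symm.trans hck.symm))⟩
          exact Or.inr ⟨k, hk, rfl, hfresh k hk he hzv, hzv⟩
      · -- pushed a+1
        have hk : a + 1 < colors.length := by
          rw [← hnl] at hg1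
          exact_mod_cast hg1
        have hkv : ((a + 1 : Nat) : Int) ∉ v := by
          intro hmem
          exact hg2 ((hvn1mem _).2 (Or.inl (by push_cast; exact_mod_cast hmem)))
        have he : pvE colors a (a + 1) := pvE_succ hk
        refine Or.inr ⟨a + 1, hk, by push_cast; ring, ?_, hkv⟩
        exact hfresh _ hk he hkv
    · -- pushed a-1
      have ha1 : 1 ≤ a := by omega
      have hk : a - 1 < colors.length := by omega
      have hcast : (a : Int) - 1 = ((a - 1 : Nat) : Int) := by omega
      have hkv : ((a - 1 : Nat) : Int) ∉ v := by
        intro hmem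
        exact hg2 ((hv1mem _).2 (Or.inl ((hvn1mem _).2 (Or.inl (hcast ▸ hmem)))))
      have he : pvE colors a (a - 1) := ⟨ha, hk, by omega, Or.inr (Or.inl (by omega))⟩
      exact Or.inr ⟨a - 1, hk, hcast, hfresh _ hk he hkv, hcast ▸ hkv⟩
  have hnxt_sub : ∀ z ∈ nxt, z ∈ vn2.2 := by
    intro z hz
    rw [hv2mem2, hv1mem2, hvn2mem]
    exact Or.inl (Or.inl (Or.inl hz))
  refine ⟨?_, ?_, ?_, ?_, ?_, ?_, ?_⟩
  · -- m1
    intro z hz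
    exact m1 z (List.mem_cons_of_mem _ hz)
  · -- m2
    intro z hz
    rcases hsound z hz with hz | ⟨i, hi, rfl, hd, _⟩
    · exact m2 z hz
    · exact ⟨i, hi, rfl, hd⟩
  · -- m3
    intro z hz
    rcases (hv2mem z).1 hz with hz1 | ⟨⟨hg1, hg2⟩, rfl⟩
    · rcases (hv1mem z).1 hz1 with hz2 | ⟨hg, rfl⟩
      · rcases (hvn1mem z).1 hz2 with hz3 | hz3
        · rcases m3 z hz3 with hL | hR
          · exact Or.inl hL
          · exact Or.inr (hnxt_sub z hR)
        · by_cases hzv : z ∈ v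
          · rcases m3 z hzv with hL | hR
            · exact Or.inl hL
            · exact Or.inr (hnxt_sub z hR)
          · refine Or.inr ?_
            rw [hv2mem2, hv1mem2, hvn2mem]
            exact Or.inl (Or.inl (Or.inr ⟨hz3, hzv⟩))
        -- pushed a+1 goes into nxt
      · refine Or.inr ?_
        rw [hv2mem2, hv1mem2]
        exact Or.inl (Or.inr ⟨hg, rfl⟩)
    · refine Or.inr ?_
      rw [hv2mem2]
      exact Or.inr ⟨⟨hg1, hg2⟩, rfl⟩
  · -- m4
    intro i hi hd
    exact hmono _ (m4 i hi hd)
  · -- m5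
    intro z hz
    rcases hsound z hz with hz1 | ⟨i, hi, rfl, hd, _⟩
    · exact hmono _ (m5 z hz1)
    · -- it is in vn2.2 and vn2.2 ⊆ vn2.1 elementwise by construction
      rcases (hv2mem2 _).1 hz with hz1 | ⟨⟨hg1, hg2⟩, he⟩
      · rcases (hv1mem2 _).1 hz1 with hz2 | ⟨⟨hg1, hg2⟩, he⟩
        · rcases (hvn2mem _).1 hz2 with hz3 | ⟨hzl, _⟩
          · exact hmono _ (m5 _ hz3)
          · exact (hv2mem _).2 (Or.inl ((hv1mem _).2 (Or.inl ((hvn1mem _).2 (Or.inr hzl)))))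
        · exact (hv2mem _).2 (Or.inl ((hv1mem _).2 (Or.inr ⟨⟨hg1, hg2⟩, he⟩)))
      · exact (hv2mem _).2 (Or.inr ⟨⟨hg1, hg2⟩, he⟩)
  · -- m6
    intro c'
    by_cases hcc : c' = c
    · subst hcc
      refine Or.inr ⟨by rw [PySem.Dict.getD_insert]; simp, ?_⟩
      intro i hi hci
      rcases m6 c with h6 | ⟨h6, hall⟩
      · have hig : (i : Int) ∈ l := by
          rw [hldef, h6]
          exact (pvGraphA_mem colors c _).2 ⟨i, hi, rfl, hci⟩
        exact (hv2mem _).2 (Or.inl ((hv1mem _).2 (Or.inl ((hvn1mem _).2 (Or.inr hig)))))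
      · exact hmono _ (hall i hi hci)
    · rw [PySem.Dict.getD_insert]
      rw [if_neg hcc]
      rcases m6 c' with h6 | ⟨h6, hall⟩
      · exact Or.inl h6
      · exact Or.inr ⟨h6, fun i hi hci => hmono _ (hall i hi hci)⟩
  · -- m7
    intro i hi hd
    rcases m7 i hi hd with hv | ⟨z, hz, b, hb, rfl, he⟩
    · exact Or.inl (hmono _ hv)
    · rcases List.mem_cons.1 hz with hzx | hzr
      · -- the witness is the node x = a being processed now
        have hba : b = a := by exact_mod_cast hzx
        subst hba
        obtain ⟨_, _, hne, hcase⟩ := he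
        rcases hcase with h4 | h4 | h4
        · -- i = b + 1
          subst h4
          refine Or.inl ?_
          have hglt : ((b + 1 : Nat) : Int) = (b : Int) + 1 := by push_cast; ring
          rw [hglt]
          have hlt : (b : Int) + 1 < PySem.List.len colors := by
            rw [← hnl]
            exact_mod_cast hi
          by_cases hin : (b : Int) + 1 ∈ vn.1
          · exact (hv2mem _).2 (Or.inl ((hv1mem _).2 (Or.inl hin)))
          · refine (hv2mem _).2 (Or.inl ((hv1mem _).2 (Or.inr ⟨⟨hlt, hin⟩, rfl⟩)))
        · -- b = i + 1
          refine Or.inl ?_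
          have hcast : ((i : Nat) : Int) = (b : Int) - 1 := by omega
          rw [hcast]
          have hge : (0 : Int) ≤ (b : Int) - 1 := by omega
          by_cases hin : (b : Int) - 1 ∈ vn1.1
          · exact (hv2mem _).2 (Or.inl hin)
          · exact (hv2mem _).2 (Or.inr ⟨⟨hge, hin⟩, rfl⟩)
        · -- same color
          refine Or.inl ?_
          rcases m6 c with h6 | ⟨h6, hall⟩
          · have hig : (i : Int) ∈ l := by
              rw [hldef, h6]
              exact (pvGraphA_mem colors c _).2 ⟨i, hi, rfl, by rw [hc]; exact h4.symm⟩
            exact (hv2mem _).2 (Or.inl ((hv1mem _).2 (Or.inl ((hvn1mem _).2 (Or.inr hig)))))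
          · exact hmono _ (hall i hi (by rw [hc]; exact h4.symm))
      · exact Or.inr ⟨(b : Int), hzr, b, hb, rfl, he⟩

-- running the expansion to the end of the level
theorem lvlExpand_inv (colors : List Int) : ∀ (R : List Int) (t : Nat)
    (g : PySem.Dict Int (List Int)) (v : PySem.Set Int) (nxt : List Int),
    pvMInv colors t R g v nxt →
    pvMInv colors t []
      (lvlExpand colors (PySem.List.len colors) R g v nxt).1
      (lvlExpand colors (PySem.List.len colors) R g v nxt).2.1
      (lvlExpand colors (PySem.List.len colors) R g v nxt).2.2 := by
  intro R
  induction R with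
  | nil => intro t g v nxt h; simpa [lvlExpand] using h
  | cons x rest ih =>
    intro t g v nxt h
    have hstep := pvMInv_step h
    simp only [lvlExpand]
    exact ih t _ _ _ hstep

-- the outer level loop returns the distance of the last index
theorem lvlOuter_correct (colors : List Int) (hne : colors ≠ []) :
    ∀ (fuel t : Nat) (g : PySem.Dict Int (List Int)) (v : PySem.Set Int) (F : List Int),
    pvTInv colors t g v F →
    t ≤ pvD colors (colors.length - 1) →
    pvD colors (colors.length - 1) - t < fuel →
    lvlOuter colors (PySem.List.len colors) fuel g v F (t : Int) =
      (pvD colors (colors.length - 1) : Int) := by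
  have hn : 0 < colors.length := List.length_pos_of_ne_nil hne
  have hcast : (PySem.List.len colors : Int) - 1 = ((colors.length - 1 : Nat) : Int) := by
    simp only [PySem.List.len_eq]
    omega
  intro fuel
  induction fuel with
  | zero =>
    intro t g v F hT hle hfu
    omega
  | succ f ih =>
    intro t g v F hT hle hfu
    obtain ⟨t1, t2, t3, t4⟩ := hT
    by_cases hmem : (PySem.List.len colors - 1) ∈ F
    · obtain ⟨i, hi, he, hd⟩ := t1 _ hmem
      have hieq : i = colors.length - 1 := by
        rw [hcast] at he
        have : (colors.length - 1 : Nat) = i := by exact_mod_cast he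
        omega
      subst hieq
      rw [lvlOuter]
      rw [if_pos hmem, hd]
    · have hdt : pvD colors (colors.length - 1) ≠ t := by
        intro h
        exact hmem (hcast ▸ t2 _ (by omega) h)
      have hlt : t < pvD colors (colors.length - 1) := by omega
      have hM := lvlExpand_inv colors F t g v [] (pvTInv_to_MInv ⟨t1, t2, t3, t4⟩)
      have hT' := pvMInv_to_TInv hM
      obtain ⟨s1, s2, s3, s4⟩ := hT'
      obtain ⟨j, hj, hdj⟩ := pvD_level_nonempty (colors := colors) (pvD colors (colors.length - 1) - (t + 1))
        (colors.length - 1) (by omega) (t + 1) (by omega)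
      have hjF : (j : Int) ∈ (lvlExpand colors (PySem.List.len colors) F g v []).2.2 :=
        s2 j hj hdj
      have hFne : (lvlExpand colors (PySem.List.len colors) F g v []).2.2 ≠ [] := by
        intro h
        rw [h] at hjF
        simp at hjF
      rw [lvlOuter]
      rw [if_neg hmem]
      simp only [hFne, if_false, reduceIte]
      have := ih (t + 1) _ _ _ ⟨s1, s2, s3, s4⟩ (by omega) (by omega)
      have hc2 : ((t : Int) + 1) = ((t + 1 : Nat) : Int) := by push_cast; ring
      rw [hc2]
      exact this

-- A's port computes the distance of the last index
theorem minimumStep_eq_d (colors : List Int) (hne : colors ≠ []) :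
    minimumStep colors = (pvD colors (colors.length - 1) : Int) := by
  have hn : 0 < colors.length := List.length_pos_of_ne_nil hne
  have hlen : ¬ (colors = [] ∨ PySem.List.len colors = 0) := by
    simp [PySem.List.len_eq, hne, List.length_eq_zero_iff]
  rw [minimumStep, if_neg hlen]
  have hsub : ∀ z ∈ ([0] : List Int), z ∈ PySem.Set.add PySem.Set.empty 0 := by
    intro z hz
    simp at hz
    simp [hz, PySem.Set.mem_add]
  rw [pvOuter_corr colors (colors.length + 1) (pvGraphA colors) _ [0] (-1) (by simp) hsub]
  have hT : pvTInv colors 0 (pvGraphA colors) (PySem.Set.add PySem.Set.empty 0) [0] := by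
    refine ⟨?_, ?_, ?_, fun c => Or.inl rfl⟩
    · intro z hz
      simp only [List.mem_singleton] at hz
      exact ⟨0, hn, by simp [hz], pvD_zero⟩
    · intro i hi hd
      have : i = 0 := pvD_eq_zero hi hd
      simp [this]
    · intro z
      constructor
      · intro hz
        have hz0 : z = 0 := by
          rcases (PySem.Set.mem_add _ _ _).1 hz with h | h
          · simp [PySem.Set.empty] at h
          · exact h
        exact ⟨0, hn, by simp [hz0], by simp [pvD_zero]⟩
      · rintro ⟨i, hi, rfl, hd⟩
        have : i = 0 := pvD_eq_zero hi (by omega)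
        simp [this, PySem.Set.mem_add]
  have := lvlOuter_correct colors hne (colors.length + 1) 0 _ _ [0] hT (Nat.zero_le _)
    (by have := pvD_le_self (colors := colors) (i := colors.length - 1) (by omega); omega)
  simpa using this

-- ---------- B-side: relaxation invariants ----------

theorem pvBwdB_length (l : List Int) : (pvBwdB l).length = l.length := by
  induction l with
  | nil => simp [pvBwdB]
  | cons x xs ih =>
    cases xs with
    | nil => simp [pvBwdB]
    | cons y rest =>
      rw [pvBwdB]
      cases h : pvBwdB (y :: rest) with
      | nil => rw [h] at ih; simp at ih
      | cons z r =>
        rw [h] at ih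
        simpa using ih

theorem pvBwdB_cons2 (x y : Int) (rest : List Int) :
    ∃ z r, pvBwdB (y :: rest) = z :: r ∧
      pvBwdB (x :: y :: rest) = (if z + 1 < x then z + 1 else x) :: z :: r := by
  cases h : pvBwdB (y :: rest) with
  | nil =>
    exfalso
    have := pvBwdB_length (y :: rest)
    rw [h] at this
    simp at this
  | cons z r =>
    refine ⟨z, r, rfl, ?_⟩
    rw [pvBwdB, h]

theorem pvBwdB_le (l : List Int) : ∀ i, i < l.length →
    (pvBwdB l).getD i 0 ≤ l.getD i 0 := by
  induction l with
  | nil => intro i hi; simp at hi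
  | cons x xs ih =>
    intro i hi
    cases xs with
    | nil =>
      match i with
      | 0 => simp [pvBwdB]
      | Nat.succ j => simp at hi
    | cons y rest =>
      obtain ⟨z, r, hzr, hcons⟩ := pvBwdB_cons2 x y rest
      rw [hcons]
      match i with
      | 0 =>
        simp only [List.getD_cons_zero]
        split_ifs <;> omega
      | Nat.succ j =>
        simp only [List.getD_cons_succ]
        rw [← hzr]
        exact ih j (by simpa using hi)

theorem pvBwdB_succ (l : List Int) : ∀ i, i + 1 < l.length →
    (pvBwdB l).getD i 0 ≤ (pvBwdB l).getD (i + 1) 0 + 1 := by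
  induction l with
  | nil => intro i hi; simp at hi
  | cons x xs ih =>
    intro i hi
    cases xs with
    | nil => simp at hi
    | cons y rest =>
      obtain ⟨z, r, hzr, hcons⟩ := pvBwdB_cons2 x y rest
      rw [hcons]
      match i with
      | 0 =>
        simp only [List.getD_cons_zero, List.getD_cons_succ]
        split_ifs <;> omega
      | Nat.succ j =>
        simp only [List.getD_cons_succ]
        have := ih j (by simp at hi ⊢; omega)
        rw [hzr] at this
        simpa using this

theorem pvBwdB_lb (l : List Int) : ∀ (Q : Nat → Int),
    (∀ i, i < l.length → Q i ≤ l.getD i 0) →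
    (∀ i, i + 1 < l.length → Q i ≤ Q (i + 1) + 1) →
    ∀ i, i < l.length → Q i ≤ (pvBwdB l).getD i 0 := by
  induction l with
  | nil => intro Q _ _ i hi; simp at hi
  | cons x xs ih =>
    intro Q hQ hadj i hi
    cases xs with
    | nil =>
      match i with
      | 0 => simpa [pvBwdB] using hQ 0 (by simp)
      | Nat.succ j => simp at hi
    | cons y rest =>
      obtain ⟨z, r, hzr, hcons⟩ := pvBwdB_cons2 x y rest
      have htail : ∀ j, j < (y :: rest).length → Q (j + 1) ≤ (pvBwdB (y :: rest)).getD j 0 := by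
        intro j hj
        exact ih (fun j => Q (j + 1))
          (fun j hj => by simpa using hQ (j + 1) (by simpa using hj))
          (fun j hj => hadj (j + 1) (by simpa using hj)) j hj
      rw [hcons]
      match i with
      | 0 =>
        simp only [List.getD_cons_zero]
        have h1 : Q 1 ≤ z := by
          have := htail 0 (by simp)
          rw [hzr] at this
          simpa using this
        have h0 : Q 0 ≤ x := by simpa using hQ 0 (by simp)
        have h01 : Q 0 ≤ Q 1 + 1 := hadj 0 (by simp)
        split_ifs <;> omega
      | Nat.succ j =>
        simp only [List.getD_cons_succ]
        rw [← hzr]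
        exact htail j (by simpa using hi)

theorem pvFwdB_length (best : PySem.Dict Int Int) :
    ∀ (cs ds : List Int) (prev : Option Int),
    (pvFwdB best prev cs ds).length = min cs.length ds.length := by
  intro cs
  induction cs with
  | nil => intro ds prev; simp [pvFwdB]
  | cons c cs ih =>
    intro ds prev
    cases ds with
    | nil => simp [pvFwdB]
    | cons x ds =>
      simp only [pvFwdB, List.length_cons, ih]
      omega

theorem pvFwdB_le (best : PySem.Dict Int Int) :
    ∀ (cs ds : List Int) (prev : Option Int) (i : Nat), i < cs.length → i < ds.length →
    (pvFwdB best prev cs ds).getD i 0 ≤ ds.getD i 0 := by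
  intro cs
  induction cs with
  | nil => intro ds prev i hi; simp at hi
  | cons c cs ih =>
    intro ds prev i hi hd
    cases ds with
    | nil => simp at hd
    | cons x ds =>
      simp only [pvFwdB]
      match i with
      | 0 =>
        simp only [List.getD_cons_zero]
        cases prev with
        | none => simp only []; split_ifs <;> omega
        | some p => simp only []; split_ifs <;> omega
      | Nat.succ j =>
        simp only [List.getD_cons_succ]
        exact ih ds _ j (by simpa using hi) (by simpa using hd)

theorem pvFwdB_best (best : PySem.Dict Int Int) :
    ∀ (cs ds : List Int) (prev : Option Int) (i : Nat), i < cs.length → i < ds.length →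
    (pvFwdB best prev cs ds).getD i 0 ≤ best.getD (cs.getD i 0) 0 + 1 := by
  intro cs
  induction cs with
  | nil => intro ds prev i hi; simp at hi
  | cons c cs ih =>
    intro ds prev i hi hd
    cases ds with
    | nil => simp at hd
    | cons x ds =>
      simp only [pvFwdB]
      match i with
      | 0 =>
        simp only [List.getD_cons_zero]
        cases prev with
        | none => simp only []; split_ifs <;> omega
        | some p => simp only []; split_ifs <;> omega
      | Nat.succ j =>
        simp only [List.getD_cons_succ]
        exact ih ds _ j (by simpa using hi) (by simpa using hd)

theorem pvFwdB_head (best : PySem.Dict Int Int) (p : Int) (c x : Int) (cs ds : List Int) :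
    (pvFwdB best (some p) (c :: cs) (x :: ds)).getD 0 0 ≤ p + 1 := by
  simp only [pvFwdB, List.getD_cons_zero]
  split_ifs <;> omega

theorem pvFwdB_succ (best : PySem.Dict Int Int) :
    ∀ (cs ds : List Int) (prev : Option Int) (i : Nat),
    i + 1 < cs.length → i + 1 < ds.length →
    (pvFwdB best prev cs ds).getD (i + 1) 0 ≤ (pvFwdB best prev cs ds).getD i 0 + 1 := by
  intro cs
  induction cs with
  | nil => intro ds prev i hi; simp at hi
  | cons c cs ih =>
    intro ds prev i hi hd
    cases ds with
    | nil => simp at hd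
    | cons x ds =>
      simp only [pvFwdB]
      match i with
      | 0 =>
        simp only [List.getD_cons_succ, List.getD_cons_zero]
        have h1 : 0 < cs.length := by simpa using hi
        have h2 : 0 < ds.length := by simpa using hd
        cases cs with
        | nil => simp at h1
        | cons c2 cs2 =>
          cases ds with
          | nil => simp at h2
          | cons x2 ds2 => exact pvFwdB_head best _ c2 x2 cs2 ds2
      | Nat.succ j =>
        simp only [List.getD_cons_succ]
        exact ih ds _ j (by simpa using hi) (by simpa using hd)

theorem pvFwdB_lb (best : PySem.Dict Int Int) :
    ∀ (cs ds : List Int) (prev : Option Int) (Q : Nat → Int),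
    (∀ i, i < cs.length → i < ds.length → Q i ≤ ds.getD i 0) →
    (∀ i, i < cs.length → i < ds.length → Q i ≤ best.getD (cs.getD i 0) 0 + 1) →
    (∀ i, i + 1 < cs.length → i + 1 < ds.length → Q (i + 1) ≤ Q i + 1) →
    (∀ p, prev = some p → Q 0 ≤ p + 1) →
    ∀ i, i < cs.length → i < ds.length → Q i ≤ (pvFwdB best prev cs ds).getD i 0 := by
  intro cs
  induction cs with
  | nil => intro ds prev Q _ _ _ _ i hi; simp at hi
  | cons c cs ih =>
    intro ds prev Q hQd hQb hadj hprev i hi hd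
    cases ds with
    | nil => simp at hd
    | cons x ds =>
      have hx : Q 0 ≤ x := by simpa using hQd 0 (by simp) (by simp)
      have hb : Q 0 ≤ best.getD c 0 + 1 := by simpa using hQb 0 (by simp) (by simp)
      cases prev with
      | none =>
        simp only [pvFwdB]
        have hQ0 : Q 0 ≤ (if best.getD c 0 + 1 < x then best.getD c 0 + 1 else x) := by
          split_ifs <;> omega
        match i with
        | 0 => simpa using hQ0
        | Nat.succ j =>
          simp only [List.getD_cons_succ]
          refine ih ds _ (fun k => Q (k + 1))
            (fun k h1 h2 => by simpa using hQd (k + 1) (by simpa using h1) (by simpa using h2))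
            (fun k h1 h2 => by simpa using hQb (k + 1) (by simpa using h1) (by simpa using h2))
            (fun k h1 h2 => hadj (k + 1) (by simpa using h1) (by simpa using h2))
            (fun p hp => ?_) j (by simpa using hi) (by simpa using hd)
          have h01 : Q (0 + 1) ≤ Q 0 + 1 :=
            hadj 0 (by simp at hi ⊢; omega) (by simp at hd ⊢; omega)
          injection hp with hp'
          subst hp'
          show Q (0 + 1) ≤ _ + 1
          omega
      | some p =>
        simp only [pvFwdB]
        have hp0 : Q 0 ≤ p + 1 := hprev p rfl
        have hQ0 : Q 0 ≤ (if p + 1 < (if best.getD c 0 + 1 < x then best.getD c 0 + 1 else x)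
            then p + 1 else (if best.getD c 0 + 1 < x then best.getD c 0 + 1 else x)) := by
          split_ifs <;> omega
        match i with
        | 0 => simpa using hQ0
        | Nat.succ j =>
          simp only [List.getD_cons_succ]
          refine ih ds _ (fun k => Q (k + 1))
            (fun k h1 h2 => by simpa using hQd (k + 1) (by simpa using h1) (by simpa using h2))
            (fun k h1 h2 => by simpa using hQb (k + 1) (by simpa using h1) (by simpa using h2))
            (fun k h1 h2 => hadj (k + 1) (by simpa using h1) (by simpa using h2))
            (fun q hq => ?_) j (by simpa using hi) (by simpa using hd)
          have h01 : Q (0 + 1) ≤ Q 0 + 1 :=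
            hadj 0 (by simp at hi ⊢; omega) (by simp at hd ⊢; omega)
          injection hq with hq'
          subst hq'
          show Q (0 + 1) ≤ _ + 1
          omega

-- the body of the best-dict building loop
def pvBStep (colors dist : List Int) (b : PySem.Dict Int Int) (i : Nat) : PySem.Dict Int Int :=
  let c := colors.getD i 0
  if b.contains c = false ∨ dist.getD i 0 < b.getD c 0 then b.insert c (dist.getD i 0)
  else b

theorem pvBestB_eq (colors dist : List Int) :
    pvBestB colors dist = (List.range colors.length).foldl (pvBStep colors dist) PySem.Dict.empty :=
  rfl

theorem pvBStep_decr (colors dist : List Int) : ∀ (l : List Nat) (b0 : PySem.Dict Int Int)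
    (c w0 : Int), b0.get? c = some w0 →
    ∃ w, (l.foldl (pvBStep colors dist) b0).get? c = some w ∧ w ≤ w0 := by
  intro l
  induction l with
  | nil => intro b0 c w0 h; exact ⟨w0, h, le_refl _⟩
  | cons i l ih =>
    intro b0 c w0 h
    simp only [List.foldl_cons, pvBStep]
    split_ifs with hcond
    · by_cases hcc : c = colors.getD i 0
      · rw [← hcc] at hcond ⊢
        have hcont : b0.contains c = true := by
          rw [PySem.Dict.contains_eq_isSome_get?, h]
          rfl
        have hlt : dist.getD i 0 < b0.getD c 0 := by
          rcases hcond with h1 | h1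
          · rw [hcont] at h1; cases h1
          · exact h1
        have hgd : b0.getD c 0 = w0 := PySem.Dict.getD_of_get?_eq_some _ 0 h
        obtain ⟨w, hw, hle⟩ := ih (b0.insert c (dist.getD i 0)) c (dist.getD i 0)
          (PySem.Dict.get?_insert_self _ _ _)
        exact ⟨w, hw, by omega⟩
      · obtain ⟨w, hw, hle⟩ := ih (b0.insert (colors.getD i 0) (dist.getD i 0)) c w0
          (by rw [PySem.Dict.get?_insert_of_ne _ _ hcc]; exact h)
        exact ⟨w, hw, hle⟩
    · exact ih b0 c w0 h

theorem pvBStep_mem (colors dist : List Int) : ∀ (l : List Nat) (b0 : PySem.Dict Int Int)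
    (j : Nat), j ∈ l →
    ∃ w, (l.foldl (pvBStep colors dist) b0).get? (colors.getD j 0) = some w ∧
      w ≤ dist.getD j 0 := by
  intro l
  induction l with
  | nil => intro b0 j h; simp at h
  | cons i l ih =>
    intro b0 j hj
    rcases List.mem_cons.1 hj with rfl | hj'
    · simp only [List.foldl_cons, pvBStep]
      split_ifs with hcond
      · obtain ⟨w, hw, hle⟩ := pvBStep_decr colors dist l _ _ _
          (PySem.Dict.get?_insert_self b0 (colors.getD j 0) (dist.getD j 0))
        exact ⟨w, hw, hle⟩
      · rw [not_or, not_lt] at hcond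
        obtain ⟨h1, h2⟩ := hcond
        have hcont : b0.contains (colors.getD j 0) = true := by
          cases hb : b0.contains (colors.getD j 0)
          · exact absurd hb h1
          · rfl
        have hsome : ∃ w0, b0.get? (colors.getD j 0) = some w0 := by
          rw [PySem.Dict.contains_eq_isSome_get?] at hcont
          exact Option.isSome_iff_exists.mp hcont
        obtain ⟨w0, hw0⟩ := hsome
        have hgd : b0.getD (colors.getD j 0) 0 = w0 := PySem.Dict.getD_of_get?_eq_some _ 0 hw0
        obtain ⟨w, hw, hle⟩ := pvBStep_decr colors dist l b0 _ _ hw0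
        exact ⟨w, hw, by omega⟩
    · exact ih _ j hj'

theorem pvBStep_val (colors dist : List Int) : ∀ (l : List Nat) (b0 : PySem.Dict Int Int)
    (c w : Int), (l.foldl (pvBStep colors dist) b0).get? c = some w →
    b0.get? c = some w ∨ ∃ j ∈ l, colors.getD j 0 = c ∧ w = dist.getD j 0 := by
  intro l
  induction l with
  | nil => intro b0 c w h; exact Or.inl h
  | cons i l ih =>
    intro b0 c w h
    simp only [List.foldl_cons] at h
    rcases ih _ c w h with h1 | ⟨j, hj, hc, hw⟩
    · simp only [pvBStep] at h1
      split_ifs at h1 with hcond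
      · by_cases hcc : c = colors.getD i 0
        · subst hcc
          rw [PySem.Dict.get?_insert_self] at h1
          injection h1 with h1'
          exact Or.inr ⟨i, List.mem_cons_self, rfl, h1'.symm⟩
        · rw [PySem.Dict.get?_insert_of_ne _ _ hcc] at h1
          exact Or.inl h1
      · exact Or.inl h1
    · exact Or.inr ⟨j, List.mem_cons_of_mem _ hj, hc, hw⟩

theorem pvBestB_le (colors dist : List Int) (j : Nat) (hj : j < colors.length) :
    ∃ w, (pvBestB colors dist).get? (colors.getD j 0) = some w ∧ w ≤ dist.getD j 0 := by
  rw [pvBestB_eq]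
  exact pvBStep_mem colors dist (List.range colors.length) PySem.Dict.empty j
    (List.mem_range.mpr hj)

theorem pvBestB_val (colors dist : List Int) (c w : Int)
    (h : (pvBestB colors dist).get? c = some w) :
    ∃ j, j < colors.length ∧ colors.getD j 0 = c ∧ w = dist.getD j 0 := by
  rw [pvBestB_eq] at h
  rcases pvBStep_val colors dist (List.range colors.length) PySem.Dict.empty c w h with
    h0 | ⟨j, hj, hc, hw⟩
  · rw [PySem.Dict.get?_empty] at h0
    cases h0
  · exact ⟨j, List.mem_range.mp hj, hc, hw⟩

-- properties of one relaxation round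
theorem pvRoundB_length (colors dist : List Int) (h : dist.length = colors.length) :
    (pvRoundB colors dist).length = colors.length := by
  rw [pvRoundB, pvBwdB_length, pvFwdB_length, h]
  omega

theorem pvFwd_len_aux (colors dist : List Int) (h : dist.length = colors.length) :
    (pvFwdB (pvBestB colors dist) none colors dist).length = colors.length := by
  rw [pvFwdB_length, h]
  omega

theorem pvRoundB_le (colors dist : List Int) (h : dist.length = colors.length)
    (i : Nat) (hi : i < colors.length) :
    (pvRoundB colors dist).getD i 0 ≤ dist.getD i 0 := by
  have hF := pvFwd_len_aux colors dist h
  have h1 := pvBwdB_le (pvFwdB (pvBestB colors dist) none colors dist) i (by omega)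
  have h2 := pvFwdB_le (pvBestB colors dist) colors dist none i hi (by omega)
  rw [pvRoundB]
  omega

theorem pvRoundB_right (colors dist : List Int) (h : dist.length = colors.length)
    (i : Nat) (hi : i + 1 < colors.length) :
    (pvRoundB colors dist).getD i 0 ≤ dist.getD (i + 1) 0 + 1 := by
  have hF := pvFwd_len_aux colors dist h
  have h1 := pvBwdB_succ (pvFwdB (pvBestB colors dist) none colors dist) i (by omega)
  have h2 := pvBwdB_le (pvFwdB (pvBestB colors dist) none colors dist) (i + 1) (by omega)
  have h3 := pvFwdB_le (pvBestB colors dist) colors dist none (i + 1) hi (by omega)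
  rw [pvRoundB]
  omega

theorem pvRoundB_left (colors dist : List Int) (h : dist.length = colors.length)
    (j : Nat) (hj : j + 1 < colors.length) :
    (pvRoundB colors dist).getD (j + 1) 0 ≤ dist.getD j 0 + 1 := by
  have hF := pvFwd_len_aux colors dist h
  have h1 := pvBwdB_le (pvFwdB (pvBestB colors dist) none colors dist) (j + 1) (by omega)
  have h2 := pvFwdB_succ (pvBestB colors dist) colors dist none j hj (by omega)
  have h3 := pvFwdB_le (pvBestB colors dist) colors dist none j (by omega) (by omega)
  rw [pvRoundB]
  omega

theorem pvRoundB_color (colors dist : List Int) (h : dist.length = colors.length)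
    (i j : Nat) (hi : i < colors.length) (hj : j < colors.length)
    (hc : colors.getD j 0 = colors.getD i 0) :
    (pvRoundB colors dist).getD i 0 ≤ dist.getD j 0 + 1 := by
  have hF := pvFwd_len_aux colors dist h
  have h1 := pvBwdB_le (pvFwdB (pvBestB colors dist) none colors dist) i (by omega)
  have h2 := pvFwdB_best (pvBestB colors dist) colors dist none i hi (by omega)
  obtain ⟨w, hw, hle⟩ := pvBestB_le colors dist j hj
  rw [hc] at hw
  have hgd : (pvBestB colors dist).getD (colors.getD i 0) 0 = w :=
    PySem.Dict.getD_of_get?_eq_some _ 0 hw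
  rw [pvRoundB]
  omega

theorem pvRoundB_lb (colors dist : List Int) (h : dist.length = colors.length)
    (hlb : ∀ i, i < colors.length → (pvD colors i : Int) ≤ dist.getD i 0) :
    ∀ i, i < colors.length → (pvD colors i : Int) ≤ (pvRoundB colors dist).getD i 0 := by
  have hF := pvFwd_len_aux colors dist h
  intro i hi
  rw [pvRoundB]
  refine pvBwdB_lb _ (fun k => (pvD colors k : Int)) ?_ ?_ i (by omega)
  · -- the forward sweep respects the lower bound
    intro k hk
    refine pvFwdB_lb (pvBestB colors dist) colors dist none (fun k => (pvD colors k : Int))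
      (fun k h1 _ => hlb k h1) ?_ ?_ (by intro p hp; cases hp) k (by omega) (by omega)
    · -- color candidates respect the lower bound
      intro k h1 _
      show (pvD colors k : Int) ≤ (pvBestB colors dist).getD (colors.getD k 0) 0 + 1
      obtain ⟨w, hw, hle⟩ := pvBestB_le colors dist k h1
      obtain ⟨j, hj, hcj, hwj⟩ := pvBestB_val colors dist _ w hw
      have hgd : (pvBestB colors dist).getD (colors.getD k 0) 0 = w :=
        PySem.Dict.getD_of_get?_eq_some _ 0 hw
      have hdk : pvD colors k ≤ pvD colors j + 1 := by
        by_cases hjk : j = k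
        · subst hjk; omega
        · exact pvD_edge_le ⟨hj, h1, hjk, Or.inr (Or.inr hcj)⟩
      have hlbj := hlb j hj
      rw [hgd, hwj]
      omega
    · -- +1 edges
      intro k h1 _
      show (pvD colors (k + 1) : Int) ≤ (pvD colors k : Int) + 1
      have he : pvE colors k (k + 1) := pvE_succ h1
      have := pvD_edge_le he
      omega
  · -- the backward sweep adjacency: -1 edges
    intro k hk
    show (pvD colors k : Int) ≤ (pvD colors (k + 1) : Int) + 1
    have he : pvE colors (k + 1) k := pvE_symm (pvE_succ (by omega))
    have := pvD_edge_le he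
    omega

-- the sandwich invariant carried through the rounds
def pvGood (colors dist : List Int) (t : Nat) : Prop :=
  dist.length = colors.length ∧
  (∀ i, i < colors.length → (pvD colors i : Int) ≤ dist.getD i 0) ∧
  (∀ i, i < colors.length → pvD colors i ≤ t → dist.getD i 0 ≤ (pvD colors i : Int))

theorem pvGood_step (colors dist : List Int) (t : Nat) (h : pvGood colors dist t) :
    pvGood colors (pvRoundB colors dist) (t + 1) := by
  obtain ⟨hl, hlb, hub⟩ := h
  refine ⟨pvRoundB_length colors dist hl, pvRoundB_lb colors dist hl hlb, ?_⟩
  intro i hi hd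
  rcases Nat.lt_or_ge (pvD colors i) (t + 1) with hlt | hge
  · have h1 := pvRoundB_le colors dist hl i hi
    have h2 := hub i hi (by omega)
    omega
  · have hdi : pvD colors i = t + 1 := by omega
    obtain ⟨j, he, hjle⟩ := pvD_pred hi hdi
    have hdistj := hub j he.1 hjle
    obtain ⟨hj, _, hne, hcase⟩ := he
    rcases hcase with h4 | h4 | h4
    · -- i = j + 1
      subst h4
      have := pvRoundB_left colors dist hl j (by omega)
      omega
    · -- j = i + 1
      subst h4
      have := pvRoundB_right colors dist hl i (by omega)
      omega
    · -- same color
      have := pvRoundB_color colors dist hl i j hi hj h4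
      omega

theorem pvGood_fix (colors dist : List Int) (t : Nat) (h : pvGood colors dist t)
    (hfix : pvRoundB colors dist = dist) : ∀ k, pvGood colors dist (t + k) := by
  intro k
  induction k with
  | zero => exact h
  | succ k ih =>
    have := pvGood_step colors dist (t + k) ih
    rw [hfix] at this
    exact this

theorem pvIterB_good (colors : List Int) : ∀ (f t : Nat) (dist : List Int),
    pvGood colors dist t → pvGood colors (pvIterB colors f dist) (t + f) := by
  intro f
  induction f with
  | zero => intro t dist h; exact h
  | succ f ih =>
    intro t dist h
    rw [pvIterB]
    split_ifs with hfix
    · exact pvGood_fix colors dist t h hfix (f + 1)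
    · have := ih (t + 1) (pvRoundB colors dist) (pvGood_step colors dist t h)
      have harith : t + 1 + f = t + (f + 1) := by omega
      rw [harith] at this
      exact this

-- B's port computes the distance of the last index
theorem minimumStep_alt_eq_d (colors : List Int) (hne : colors ≠ []) :
    minimumStep_alt colors = (pvD colors (colors.length - 1) : Int) := by
  have hn : 0 < colors.length := List.length_pos_of_ne_nil hne
  rw [minimumStep_alt, if_neg hne]
  have h0 : pvGood colors
      ((0 : Int) :: List.replicate (colors.length - 1) (PySem.List.len colors)) 0 := by
    refine ⟨by simp; omega, ?_, ?_⟩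
    · intro i hi
      match i with
      | 0 => simp [pvD_zero]
      | Nat.succ j =>
        have hj : j < colors.length - 1 := by omega
        show (pvD colors (j + 1) : Int) ≤
          ((0 : Int) :: List.replicate (colors.length - 1) (PySem.List.len colors)).getD (j + 1) 0
        have hrep : ((0 : Int) :: List.replicate (colors.length - 1)
            (PySem.List.len colors)).getD (j + 1) 0 = (colors.length : Int) := by
          simp only [List.getD_cons_succ]
          rw [List.getD_eq_getElem _ _ (by simpa using hj)]
          simp [PySem.List.len_eq]
        rw [hrep]
        have := pvD_le_self (colors := colors) (i := j + 1) hi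
        omega
    · intro i hi hd
      have : i = 0 := pvD_eq_zero hi (by omega)
      subst this
      simp [pvD_zero]
  have hgood := pvIterB_good colors (colors.length - 1) 0 _ h0
  obtain ⟨hl, hlb, hub⟩ := hgood
  have hdle : pvD colors (colors.length - 1) ≤ 0 + (colors.length - 1) := by
    have := pvD_le_self (colors := colors) (i := colors.length - 1) (by omega)
    omega
  have h1 := hlb (colors.length - 1) (by omega)
  have h2 := hub (colors.length - 1) (by omega) hdle
  omega

-- ===== VERDICT (by name: the statement is the Claim_ definition above) =====
theorem minimumStep_spec : Claim_equal_minimumStep := by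
  intro colors _
  unfold Spec_minimumStep
  by_cases h : colors = []
  · subst h
    simp [minimumStep, minimumStep_alt]
  · rw [minimumStep_eq_d colors h, minimumStep_alt_eq_d colors h]
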